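-- pv_equiv track=rewrite | github.com/flamingrickpat/private-machine | pm/utils/cluster_utils.py | split_block_keep_order
-- ===== SOURCE A (Python) =====
-- from typing import Iterable, List, Tuple, Any, Dict
--
-- def split_block_keep_order(objs: List[Any], min_chunk_size: int = 8) -> List[List[Any]]:
--     """
--     Split a list 'objs' into chunks, each of length >= min_chunk_size.
--     Order is preserved. If the list is too short to split into two valid chunks,
--     it is returned as a single block.
--     """
--     n = len(objs)
--     # If we can't make at least two chunks of size >= min_chunk_size, keep as one block
--     if n < 2 * min_chunk_size:
--         return [objs]
--
--     # Number of chunks if we start from min sizes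
--     k = n // min_chunk_size  # at least 2 here because of the guard above
--     sizes = [min_chunk_size] * k
--     remaining = n - min_chunk_size * k
--
--     # Distribute the remainder as evenly as possible across chunks (preserving order)
--     i = 0
--     while remaining > 0:
--         sizes[i % k] += 1
--         remaining -= 1
--         i += 1
--
--     # Slice according to computed sizes
--     chunks = []
--     start = 0
--     for s in sizes:
--         chunks.append(objs[start:start + s])
--         start += s
--     return chunks
-- ===== SOURCE B (Python) =====
-- def split_block_keep_order(objs, min_chunk_size=8):
--     """
--     Split 'objs' into order-preserving chunks of length >= min_chunk_size.
--     Closed-form boundaries via divmod instead of A's round-robin remainder loop.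
--     """
--     n = len(objs)
--     if n < 2 * min_chunk_size:
--         return [objs]
--     k = n // min_chunk_size
--     q, r = divmod(n, k)
--     chunks = []
--     start = 0
--     for i in range(k):
--         end = start + q + (1 if i < r else 0)
--         chunks.append(objs[start:end])
--         start = end
--     return chunks
-- ===== Notes on version B (the rewrite author's own statement) =====
-- stated objective: simpler
-- what changed: A distributes the remainder with a round-robin while-loop over a mutable sizes array and then slices; B computes each chunk size in closed form via q, r = divmod(n, k) and builds the chunks in a single slicing pass, with no sizes array and no distribution loop.
-- outside the precondition, e.g. on split_block_keep_order([], -1): A returns [], B raises ZeroDivisionError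
import Mathlib
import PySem

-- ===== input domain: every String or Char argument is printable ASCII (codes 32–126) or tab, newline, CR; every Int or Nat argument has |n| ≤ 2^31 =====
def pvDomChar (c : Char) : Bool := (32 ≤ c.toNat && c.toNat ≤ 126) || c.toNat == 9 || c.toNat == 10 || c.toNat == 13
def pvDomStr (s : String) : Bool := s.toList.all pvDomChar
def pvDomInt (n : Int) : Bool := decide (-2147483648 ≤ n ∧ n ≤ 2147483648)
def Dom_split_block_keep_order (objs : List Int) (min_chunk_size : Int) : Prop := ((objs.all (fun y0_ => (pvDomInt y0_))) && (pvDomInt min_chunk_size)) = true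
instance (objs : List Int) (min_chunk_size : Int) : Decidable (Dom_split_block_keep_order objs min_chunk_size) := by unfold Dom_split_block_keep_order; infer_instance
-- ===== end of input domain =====

-- B replaces A's round-robin remainder-distribution loop by a closed-form divmod chunk-size
-- computation (objective: simpler); equal return values on Pre_.


-- ===== PORT A =====
-- while remaining > 0: sizes[i % k] += 1; remaining -= 1; i += 1
def pvDistLoop (sizes : List Int) (remaining i k : Int) : List Int :=
  if 0 < remaining then
    pvDistLoop
      (PySem.List.pySetD sizes (PySem.Int.mod i k)
        (PySem.List.pyGetD sizes (PySem.Int.mod i k) 0 + 1))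
      (remaining - 1) (i + 1) k
  else sizes
termination_by remaining.toNat
decreasing_by omega

def split_block_keep_order (objs : List Int) (min_chunk_size : Int) : List (List Int) :=
  let n : Int := PySem.List.len objs
  if n < 2 * min_chunk_size then [objs]
  else
    let k : Int := PySem.Int.floordiv n min_chunk_size
    let sizes : List Int := List.replicate k.toNat min_chunk_size
    let remaining : Int := n - min_chunk_size * k
    let sizes' : List Int := pvDistLoop sizes remaining 0 k
    (sizes'.foldl
      (fun (st : List (List Int) × Int) s =>
        (st.1 ++ [PySem.List.slice objs (some st.2) (some (st.2 + s))], st.2 + s))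
      ([], 0)).1

-- ===== PORT B =====
def split_block_keep_order_alt (objs : List Int) (min_chunk_size : Int) : List (List Int) :=
  let n : Int := PySem.List.len objs
  if n < 2 * min_chunk_size then [objs]
  else
    let k : Int := PySem.Int.floordiv n min_chunk_size
    let q : Int := PySem.Int.floordiv n k
    let r : Int := PySem.Int.mod n k
    ((PySem.List.pyRange 0 k 1).foldl
      (fun (st : List (List Int) × Int) i =>
        let e : Int := st.2 + q + (if i < r then 1 else 0)
        (st.1 ++ [PySem.List.slice objs (some st.2) (some e)], e))
      ([], 0)).1

-- ===== PRECONDITION & SPEC =====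
-- Pre_ excludes min_chunk_size = 0, where both programs raise ZeroDivisionError, and the
-- degenerate input of an empty objs with a negative min_chunk_size, where A accidentally returns an empty result while
-- B's own divmod(0, 0) raises ZeroDivisionError (cited in claim.json).
def Pre_split_block_keep_order (objs : List Int) (min_chunk_size : Int) : Prop :=
  min_chunk_size ≠ 0 ∧ (objs = [] → 0 < min_chunk_size)
instance (objs : List Int) (min_chunk_size : Int) : Decidable (Pre_split_block_keep_order objs min_chunk_size) := by unfold Pre_split_block_keep_order; infer_instance

def pvWitness_split_block_keep_order : List Int × Int := ([1, 2, 3, 4, 5], 2)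

def Spec_split_block_keep_order (objs : List Int) (min_chunk_size : Int) (out : List (List Int)) : Prop := out = split_block_keep_order_alt objs min_chunk_size
instance (objs : List Int) (min_chunk_size : Int) (out : List (List Int)) : Decidable (Spec_split_block_keep_order objs min_chunk_size out) := by unfold Spec_split_block_keep_order; infer_instance

-- ===== CLAIM (what is proved, stated in full; the proofs are below) =====
def Claim_equal_split_block_keep_order : Prop := ∀ (objs : List Int) (min_chunk_size : Int), Dom_split_block_keep_order objs min_chunk_size → Pre_split_block_keep_order objs min_chunk_size → Spec_split_block_keep_order objs min_chunk_size (split_block_keep_order objs min_chunk_size)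

-- ===== LEMMAS AND PROOFS =====

-- chunk-size profile after t round-robin increments starting from [m] * k (k > 0)
def pvProfile (m k t : Int) : List Int :=
  (PySem.List.pyRange 0 k 1).map (fun j => m + t / k + if j < t % k then 1 else 0)

theorem pvSetD_eq_set (xs : List Int) (i : Int) (v : Int) (h0 : 0 ≤ i) (h1 : i < xs.length) :
    PySem.List.pySetD xs i v = xs.set i.toNat v := by
  simp [PySem.List.pySetD, PySem.List.pySet?, PySem.List.pyIdx?, h0, h1]

theorem pvSetD_nil (i : Int) (v : Int) : PySem.List.pySetD ([] : List Int) i v = [] := by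
  simp only [PySem.List.pySetD, PySem.List.pySet?]
  rcases h : PySem.List.pyIdx? 0 i with _ | j <;> simp [h]

theorem pvDistLoop_nil (remaining i k : Int) : pvDistLoop [] remaining i k = [] := by
  rw [pvDistLoop]
  split
  · rw [pvSetD_nil, pvDistLoop_nil]
  · rfl
termination_by remaining.toNat
decreasing_by omega

theorem pvProfile_zero (m k : Int) : pvProfile m k 0 = List.replicate k.toNat m := by
  simp [pvProfile, PySem.List.pyRange_one, List.map_map, Function.comp_def,
    Int.not_lt.mpr (Int.natCast_nonneg _), List.map_const']

theorem pvProfile_step (m k t : Int) (hk : 0 < k) :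
    PySem.List.pySetD (pvProfile m k t) (PySem.Int.mod t k)
      (PySem.List.pyGetD (pvProfile m k t) (PySem.Int.mod t k) 0 + 1)
      = pvProfile m k (t + 1) := by
  have hje : PySem.Int.mod t k = t % k := PySem.Int.mod_eq_emod_of_pos hk
  have hb0 : 0 ≤ t % k := Int.emod_nonneg t (ne_of_gt hk)
  have hbk : t % k < k := Int.emod_lt_of_pos t hk
  have hlen : (pvProfile m k t).length = k.toNat := by
    simp [pvProfile, PySem.List.length_pyRange_one]
  have hget : PySem.List.pyGetD (pvProfile m k t) (t % k) 0 = m + t / k := by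
    rw [pvProfile, PySem.List.pyGetD_map_pyRange_of_nonneg _ k _ 0 hb0 hbk]
    simp
  rw [hje, hget, pvSetD_eq_set _ _ _ hb0 (by rw [hlen]; omega)]
  have hteq : k * (t / k) + t % k = t := Int.mul_ediv_add_emod t k
  have h1 : t + 1 = (t % k + 1) + (t / k) * k := by linear_combination -hteq
  have hdiv : (t + 1) / k = (t % k + 1) / k + t / k := by
    rw [h1, Int.add_mul_ediv_right _ _ (ne_of_gt hk)]
  have hmod : (t + 1) % k = (t % k + 1) % k := by
    rw [h1, Int.add_mul_emod_self_right]
  apply List.ext_getElem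
  · simp [pvProfile, PySem.List.length_pyRange_one]
  intro x hx1 hx2
  rw [List.getElem_set]
  simp only [pvProfile, List.getElem_map, PySem.List.getElem_pyRange_one]
  have hxk : (x : Int) < k := by
    simp only [List.length_set, hlen] at hx1; omega
  by_cases hbl : t % k + 1 < k
  · have hd : (t % k + 1) / k = 0 := Int.ediv_eq_zero_of_lt (by omega) hbl
    have hm : (t % k + 1) % k = t % k + 1 := Int.emod_eq_of_lt (by omega) hbl
    rw [hdiv, hmod, hd, hm]
    split_ifs <;> omega
  · have hbe : t % k + 1 = k := by omega
    have hd : (t % k + 1) / k = 1 := by rw [hbe]; exact Int.ediv_self (ne_of_gt hk)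
    have hm : (t % k + 1) % k = 0 := by rw [hbe]; exact Int.emod_self
    rw [hdiv, hmod, hd, hm]
    split_ifs <;> omega

theorem pvDistLoop_profile (m k : Int) (hk : 0 < k) :
    ∀ (rem : Nat) (t : Int), 0 ≤ t →
      pvDistLoop (pvProfile m k t) (rem : Int) t k = pvProfile m k (t + rem) := by
  intro rem
  induction rem with
  | zero => intro t _; rw [pvDistLoop]; norm_num
  | succ r ih =>
    intro t ht
    rw [pvDistLoop]
    rw [if_pos (by omega : (0 : Int) < ((r + 1 : Nat) : Int))]
    rw [pvProfile_step m k t hk]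
    have hc : ((r + 1 : Nat) : Int) - 1 = ((r : Nat) : Int) := by omega
    rw [hc, ih (t + 1) (by omega)]
    congr 1
    omega

theorem pv_ediv_shift (n m K : Int) (hK : K ≠ 0) : n / K = m + (n - m * K) / K := by
  conv_lhs => rw [show n = (n - m * K) + m * K by ring]
  rw [Int.add_mul_ediv_right _ _ hK]
  ring

theorem pv_emod_shift (n m K : Int) : n % K = (n - m * K) % K := by
  conv_lhs => rw [show n = (n - m * K) + m * K by ring]
  rw [Int.add_mul_emod_self_right]

theorem pvFold_sizes (objs : List Int) (szf : Int → Int) (q r : Int)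
    (hszf : ∀ j, szf j = q + if j < r then 1 else 0) :
    ∀ (idx : List Int) (acc : List (List Int)) (start : Int),
      ((idx.map szf).foldl
        (fun (st : List (List Int) × Int) s =>
          (st.1 ++ [PySem.List.slice objs (some st.2) (some (st.2 + s))], st.2 + s))
        (acc, start))
      = (idx.foldl
        (fun (st : List (List Int) × Int) i =>
          let e : Int := st.2 + q + (if i < r then 1 else 0)
          (st.1 ++ [PySem.List.slice objs (some st.2) (some e)], e))
        (acc, start)) := by
  intro idx
  induction idx with
  | nil => intro acc start; rfl
  | cons i is ih =>
    intro acc start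
    simp only [List.map_cons, List.foldl_cons]
    have he : start + szf i = start + q + (if i < r then 1 else 0) := by
      rw [hszf i]; ring
    rw [he]
    exact ih _ _

-- ===== VERDICT (by name: the statement is the Claim_ definition above) =====
theorem split_block_keep_order_spec : Claim_equal_split_block_keep_order := by
  intro objs m _hDom hPre
  obtain ⟨hm0, hnil⟩ := hPre
  unfold Spec_split_block_keep_order split_block_keep_order split_block_keep_order_alt
  simp only [PySem.List.len_eq]
  by_cases hguard : (objs.length : Int) < 2 * m
  · simp [hguard]
  · rw [if_neg hguard, if_neg hguard]
    rcases lt_or_gt_of_ne hm0 with hmneg | hmpos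
    · -- m < 0: k < 0, both sides are []
      have hne : objs ≠ [] := fun h => absurd (hnil h) (by omega)
      have hn1 : 1 ≤ (objs.length : Int) := by
        have := List.length_pos_iff.mpr hne; omega
      have hmod := (PySem.Int.mod_neg_bounds (a := (objs.length : Int)) hmneg).2
      have hfm := PySem.Int.floordiv_mul_add_mod (objs.length : Int) m
      have hkneg : PySem.Int.floordiv (objs.length : Int) m < 0 := by
        rcases lt_or_ge (PySem.Int.floordiv (objs.length : Int) m) 0 with h | h
        · exact h
        · have : PySem.Int.floordiv (objs.length : Int) m * m ≤ 0 :=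
            mul_nonpos_of_nonneg_of_nonpos h (le_of_lt hmneg)
          omega
      rw [PySem.List.pyRange_one_eq_nil (by omega)]
      have hrep : (PySem.Int.floordiv (objs.length : Int) m).toNat = 0 := by omega
      rw [hrep]
      simp [pvDistLoop_nil]
    · -- m > 0: the real case
      have hge : 2 * m ≤ (objs.length : Int) := by omega
      have hfd : PySem.Int.floordiv (objs.length : Int) m = (objs.length : Int) / m :=
        PySem.Int.floordiv_eq_ediv_of_pos hmpos
      have hk : 0 < PySem.Int.floordiv (objs.length : Int) m := by
        rw [hfd]
        have : (2 : Int) ≤ (objs.length : Int) / m := (Int.le_ediv_iff_mul_le hmpos).mpr (by omega)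
        omega
      have hrem0 : 0 ≤ (objs.length : Int) - m * PySem.Int.floordiv (objs.length : Int) m := by
        have hed : (objs.length : Int) % m = (objs.length : Int) - m * ((objs.length : Int) / m) :=
          Int.emod_def (objs.length : Int) m
        have hmod0 : 0 ≤ (objs.length : Int) % m := Int.emod_nonneg (objs.length : Int) (ne_of_gt hmpos)
        rw [hfd]; omega
      have hsizes : pvDistLoop
          (List.replicate (PySem.Int.floordiv (objs.length : Int) m).toNat m)
          ((objs.length : Int) - m * PySem.Int.floordiv (objs.length : Int) m) 0
          (PySem.Int.floordiv (objs.length : Int) m)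
          = pvProfile m (PySem.Int.floordiv (objs.length : Int) m)
              ((objs.length : Int) - m * PySem.Int.floordiv (objs.length : Int) m) := by
        rw [← pvProfile_zero m (PySem.Int.floordiv (objs.length : Int) m)]
        have hcast : (objs.length : Int) - m * PySem.Int.floordiv (objs.length : Int) m
            = ((((objs.length : Int) - m * PySem.Int.floordiv (objs.length : Int) m).toNat : Nat) : Int) := by
          omega
        rw [hcast, pvDistLoop_profile m (PySem.Int.floordiv (objs.length : Int) m) hk _ 0 (by omega)]
        norm_num
      have hq : PySem.Int.floordiv (objs.length : Int) (PySem.Int.floordiv (objs.length : Int) m)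
          = m + ((objs.length : Int) - m * PySem.Int.floordiv (objs.length : Int) m)
              / PySem.Int.floordiv (objs.length : Int) m := by
        rw [PySem.Int.floordiv_eq_ediv_of_pos hk]
        exact pv_ediv_shift _ m _ (ne_of_gt hk)
      have hr : PySem.Int.mod (objs.length : Int) (PySem.Int.floordiv (objs.length : Int) m)
          = ((objs.length : Int) - m * PySem.Int.floordiv (objs.length : Int) m)
              % PySem.Int.floordiv (objs.length : Int) m := by
        rw [PySem.Int.mod_eq_emod_of_pos hk]
        exact pv_emod_shift _ m _
      have hfold := pvFold_sizes objs
        (fun j => m + ((objs.length : Int) - m * PySem.Int.floordiv (objs.length : Int) m)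
            / PySem.Int.floordiv (objs.length : Int) m
          + if j < ((objs.length : Int) - m * PySem.Int.floordiv (objs.length : Int) m)
              % PySem.Int.floordiv (objs.length : Int) m then 1 else 0)
        (m + ((objs.length : Int) - m * PySem.Int.floordiv (objs.length : Int) m)
            / PySem.Int.floordiv (objs.length : Int) m)
        (((objs.length : Int) - m * PySem.Int.floordiv (objs.length : Int) m)
            % PySem.Int.floordiv (objs.length : Int) m)
        (fun j => rfl)
        (PySem.List.pyRange 0 (PySem.Int.floordiv (objs.length : Int) m) 1) [] 0
      rw [hsizes, pvProfile, hfold]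
      simp only [hq, hr]
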